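-- pv_equiv track=rewrite | github.com/RomanMordovtsev/university-projects | Algorithms/ht1/finder.py | kmp_finder
-- ===== SOURCE A (Python) =====
-- def kmp_table(word):
--     table = [0]*len(word)
--     for i in range(1, len(word)):
--         for j in range(0, i):
--             if word[0:j+1] == word[i-j:i+1]:
--                 table[i] = j + 1
--     return table
--
-- def kmp_finder(string, word):
--     table = kmp_table(word)
--     i,j,count = 0, 0, 0
--     while i < len(string):
--         if word[j] == string[i]:
--             j += 1
--             if j == len(word):
--                 j = 0
--                 count += 1
--                 if len(word) == 1:
--                     i += 1
--             else:
--                 i += 1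
--         else:
--             if j == 0:
--                 i += 1
--             else:
--                 j = table[j-1]
--     return count
-- ===== SOURCE B (Python) =====
-- def kmp_finder(string, word):
--     m = len(word)
--     # prefix (failure) function, computed incrementally in O(m)
--     pi = [0] * m
--     k = 0
--     for i in range(1, m):
--         while k > 0 and word[i] != word[k]:
--             k = pi[k - 1]
--         if word[i] == word[k]:
--             k += 1
--         pi[i] = k
--     # single scan over the text; count every occurrence
--     count = 0
--     j = 0
--     for c in string:
--         while j > 0 and word[j] != c:
--             j = pi[j - 1]
--         if word[j] == c:
--             j += 1
--         if j == m:
--             count += 1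
--             j = pi[j - 1]
--     return count
-- ===== Notes on version B (the rewrite author's own statement) =====
-- stated objective: faster
-- what changed: The failure table is computed incrementally via the classical O(m) prefix-function recurrence instead of A's triple-nested slice comparisons, and the text is scanned in a single pass that, after a full match, resumes from pi[m-1] as standard KMP does.
-- intended difference: On inputs where two occurrences of word overlap by at least two characters, A restarts matching at the last matched character and so undercounts (A('aaaa','aaa') = 1), while B resumes with the failure link pi[m-1] and returns the full overlapping occurrence count (2), which is the intended behaviour of a KMP occurrence counter. — e.g. on kmp_finder("aaaa", "aaa"): A returns 1, B returns 2
import Mathlib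
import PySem

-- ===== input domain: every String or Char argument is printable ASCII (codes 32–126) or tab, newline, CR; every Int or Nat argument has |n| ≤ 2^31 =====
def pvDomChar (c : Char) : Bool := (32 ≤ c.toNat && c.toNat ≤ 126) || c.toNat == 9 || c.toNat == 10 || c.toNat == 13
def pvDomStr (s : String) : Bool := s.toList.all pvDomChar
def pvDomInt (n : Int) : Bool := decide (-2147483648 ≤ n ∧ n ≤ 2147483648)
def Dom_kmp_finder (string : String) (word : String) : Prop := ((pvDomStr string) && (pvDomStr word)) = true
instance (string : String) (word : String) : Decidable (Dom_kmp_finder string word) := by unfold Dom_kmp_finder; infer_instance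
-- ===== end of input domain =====

-- B computes the failure table by the O(m) incremental prefix-function recurrence instead of
-- A's O(m^3) nested slice comparisons, and scans the text once, resuming with pi[m-1] after a
-- full match (standard KMP); outside D_ the two agree, inside D_ A undercounts.

-- ===== PORT A =====
-- kmp_table: table = [0]*m; for i in range(1,m): for j in range(0,i): if word[0:j+1]==word[i-j:i+1]: table[i]=j+1
def kmpTableA (w : List Char) : List Int :=
  (PySem.List.pyRange 1 (w.length : Int) 1).foldl (fun table i =>
    (PySem.List.pyRange 0 i 1).foldl (fun table j =>
      if PySem.List.slice w (some 0) (some (j + 1)) =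
         PySem.List.slice w (some (i - j)) (some (i + 1))
      then PySem.List.pySetD table i (j + 1) else table) table)
    (List.replicate w.length 0)

-- the while loop of kmp_finder; fuel is a totalization guard only (2*len(string)+1 always suffices)
def kmpLoopA (s w : List Char) (table : List Int) : Nat → Nat → Nat → Int → Int
  | 0, _, _, count => count
  | fuel+1, i, j, count =>
    if i < s.length then
      if PySem.List.pyGet? w (j : Int) = PySem.List.pyGet? s (i : Int) then
        if j + 1 = w.length then
          if w.length = 1 then kmpLoopA s w table fuel (i+1) 0 (count+1)
          else kmpLoopA s w table fuel i 0 (count+1)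
        else kmpLoopA s w table fuel (i+1) (j+1) count
      else
        if j = 0 then kmpLoopA s w table fuel (i+1) 0 count
        else kmpLoopA s w table fuel i ((PySem.List.pyGetD table ((j : Int) - 1) 0).toNat) count
    else count

def kmp_finder (string : String) (word : String) : Int :=
  kmpLoopA string.toList word.toList (kmpTableA word.toList) (2 * string.toList.length + 1) 0 0 0

-- ===== PORT B =====
-- the inner 'while j > 0 and word[?] != c: j = pi[j-1]' loop; fuel is a totalization guard
-- only (the initial j always suffices, since pi entries are bounded by their index)
def kmpChase (w : List Char) (pi : List Int) (c : Char) : Nat → Nat → Nat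
  | _, 0 => 0
  | 0, k+1 => k+1
  | fuel+1, k+1 =>
    if w.getD (k+1) ' ' = c then k+1
    else kmpChase w pi c fuel (pi.getD k 0).toNat

-- the updated k of one iteration of B's prefix-function loop: chase, then extend on a match
def kmpPrefixK (w : List Char) (st : List Int × Nat) (i : Nat) : Nat :=
  if w.getD i ' ' = w.getD (kmpChase w st.1 (w.getD i ' ') st.2 st.2) ' '
  then kmpChase w st.1 (w.getD i ' ') st.2 st.2 + 1
  else kmpChase w st.1 (w.getD i ' ') st.2 st.2

-- one iteration of B's prefix-function loop (state = (pi, k), index i)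
def kmpPrefixStep (w : List Char) (st : List Int × Nat) (i : Nat) : List Int × Nat :=
  (st.1.set i (kmpPrefixK w st i : Int), kmpPrefixK w st i)

def kmpPrefix (w : List Char) : List Int :=
  ((List.range' 1 (w.length - 1)).foldl (kmpPrefixStep w) (List.replicate w.length 0, 0)).1

-- the updated j of one iteration of B's scan loop: chase, then extend on a match
def kmpScanJ (w : List Char) (pi : List Int) (j : Nat) (c : Char) : Nat :=
  if w.getD (kmpChase w pi c j j) ' ' = c
  then kmpChase w pi c j j + 1
  else kmpChase w pi c j j

-- one iteration of B's scan loop: on a full match count it and resume from pi[j-1]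
def kmpScanStep2 (w : List Char) (pi : List Int) (m : Nat) (st : Nat × Int) (c : Char) : Nat × Int :=
  if kmpScanJ w pi st.1 c = m
  then ((pi.getD (kmpScanJ w pi st.1 c - 1) 0).toNat, st.2 + 1)
  else (kmpScanJ w pi st.1 c, st.2)

def kmp_finder_alt (string : String) (word : String) : Int :=
  (string.toList.foldl
    (kmpScanStep2 word.toList (kmpPrefix word.toList) word.toList.length) (0, 0)).2

-- ===== PRECONDITION & SPEC =====
-- Pre_ excludes exactly the inputs where A raises: word = "" with string ≠ "" (word[j] IndexError).
def Pre_kmp_finder (string : String) (word : String) : Prop := word ≠ "" ∨ string = ""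
instance (string : String) (word : String) : Decidable (Pre_kmp_finder string word) := by unfold Pre_kmp_finder; infer_instance
def pvWitness_kmp_finder : String × String := ("abab", "ab")

-- On inputs where two occurrences of word overlap by at least two characters (equivalently:
-- word self-overlaps with some shift d ≤ len(word)-2 and the overlapped double word[:d]+word
-- occurs in string), A restarts matching at the last matched character and so undercounts
-- (A "aaaa" "aaa" = 1), while B resumes with the failure link pi[m-1] and returns the full
-- overlapping occurrence count (2), the intended behaviour of a KMP occurrence counter.
def D_kmp_finder (string : String) (word : String) : Prop :=
  ∃ d, d < word.toList.length ∧ 1 ≤ d ∧ d + 2 ≤ word.toList.length ∧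
    word.toList.drop d = word.toList.take (word.toList.length - d) ∧
    (word.toList.take d ++ word.toList) <:+: string.toList
instance (string : String) (word : String) : Decidable (D_kmp_finder string word) := by unfold D_kmp_finder; infer_instance

def Spec_kmp_finder (string : String) (word : String) (out : Int) : Prop :=
  ¬ D_kmp_finder string word → out = kmp_finder_alt string word
instance (string : String) (word : String) (out : Int) : Decidable (Spec_kmp_finder string word out) := by unfold Spec_kmp_finder; infer_instance

def pvDiffWitness_kmp_finder : String × String := ("aaaa", "aaa")
def pvDiffWitnessOut_kmp_finder : Int × Int := (1, 2)

-- ===== CLAIM (what is proved, stated in full; the proofs are below) =====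
def Claim_unchanged_kmp_finder : Prop := ∀ (string : String) (word : String), Dom_kmp_finder string word → Pre_kmp_finder string word → Spec_kmp_finder string word (kmp_finder string word)
def Claim_exact_kmp_finder : Prop := ∀ (string : String) (word : String), Dom_kmp_finder string word → Pre_kmp_finder string word → D_kmp_finder string word → kmp_finder string word ≠ kmp_finder_alt string word
def Claim_changed_kmp_finder : Prop := Dom_kmp_finder (pvDiffWitness_kmp_finder.1) (pvDiffWitness_kmp_finder.2) ∧ Pre_kmp_finder (pvDiffWitness_kmp_finder.1) (pvDiffWitness_kmp_finder.2) ∧ D_kmp_finder (pvDiffWitness_kmp_finder.1) (pvDiffWitness_kmp_finder.2) ∧ kmp_finder (pvDiffWitness_kmp_finder.1) (pvDiffWitness_kmp_finder.2) = pvDiffWitnessOut_kmp_finder.1 ∧ kmp_finder_alt (pvDiffWitness_kmp_finder.1) (pvDiffWitness_kmp_finder.2) = pvDiffWitnessOut_kmp_finder.2 ∧ pvDiffWitnessOut_kmp_finder.1 ≠ pvDiffWitnessOut_kmp_finder.2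

-- ===== LEMMAS AND PROOFS =====

-- A's post-match scan step, used only in the proofs: A resets j to 0 and re-reads the last
-- matched character, which amounts to this step function on the same (j, count) state
def kmpScanStep (w : List Char) (pi : List Int) (m : Nat) (st : Nat × Int) (c : Char) : Nat × Int :=
  if kmpScanJ w pi st.1 c = m
  then (if 1 < m ∧ w.getD 0 ' ' = c then 1 else 0, st.2 + 1)
  else (kmpScanJ w pi st.1 c, st.2)

-- k is a (proper) border of the prefix of length t: w.take k is both a prefix (automatic) and a suffix of w.take t
abbrev IsBorder (w : List Char) (k t : Nat) : Prop := k < t ∧ (w.take k) <:+ (w.take t)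

-- the prefix function: length of the longest proper border of the prefix of length i+1
def pf (w : List Char) (i : Nat) : Nat :=
  Nat.findGreatest (fun k => 0 < k ∧ IsBorder w k (i+1)) i

lemma pf_le (w : List Char) (i : Nat) : pf w i ≤ i := Nat.findGreatest_le i

lemma pf_zero (w : List Char) : pf w 0 = 0 := rfl

lemma border_trans {w : List Char} {a b c : Nat} (h1 : IsBorder w a b) (h2 : IsBorder w b c) :
    IsBorder w a c := ⟨h1.1.trans h2.1, h1.2.trans h2.2⟩

lemma border_of_borders {w : List Char} {a b t : Nat} (h1 : IsBorder w a t) (h2 : IsBorder w b t)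
    (hab : a < b) : IsBorder w a b := by
  refine ⟨hab, List.suffix_of_suffix_length_le h1.2 h2.2 ?_⟩
  simp only [List.length_take]
  omega

lemma border_le_pf {w : List Char} {k t : Nat} (h : IsBorder w k t) (h0 : 0 < t) :
    k ≤ pf w (t - 1) := by
  rcases Nat.eq_zero_or_pos k with hk | hk
  · omega
  · have ht : t - 1 + 1 = t := by omega
    unfold pf
    rw [ht]
    exact Nat.le_findGreatest (by omega) ⟨hk, h⟩

lemma pf_is_border {w : List Char} (i : Nat) : pf w i = 0 ∨ (0 < pf w i ∧ IsBorder w (pf w i) (i+1)) := by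
  rcases Nat.eq_zero_or_pos (pf w i) with h | h
  · exact Or.inl h
  · refine Or.inr ⟨h, ?_⟩
    have h0 : pf w i ≠ 0 := by omega
    unfold pf at *
    have hex : ¬ (∀ n, 0 < n → n ≤ i → ¬ (0 < n ∧ IsBorder w n (i+1))) := by
      intro hall
      exact h0 (Nat.findGreatest_eq_zero_iff.mpr hall)
    push Not at hex
    obtain ⟨n, hn0, hni, hP⟩ := hex
    exact (Nat.findGreatest_spec (P := fun k => 0 < k ∧ IsBorder w k (i+1)) hni hP).2

lemma concat_suffix_concat {a b : Char} {u v : List Char} :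
    (u ++ [a] <:+ v ++ [b]) ↔ (u <:+ v ∧ a = b) := by
  rw [← List.reverse_prefix]
  simp only [List.reverse_append, List.reverse_singleton, List.singleton_append,
    List.cons_prefix_cons]
  rw [List.reverse_prefix]
  tauto

lemma border_succ_iff {w : List Char} {k t : Nat} (hk : k < t) (ht : t < w.length) :
    IsBorder w (k+1) (t+1) ↔ IsBorder w k t ∧ w.getD t ' ' = w.getD k ' ' := by
  have hkl : k < w.length := by omega
  have h1 : w.take (k+1) = w.take k ++ [w[k]] := List.take_succ_eq_append_getElem hkl
  have h2 : w.take (t+1) = w.take t ++ [w[t]] := List.take_succ_eq_append_getElem ht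
  unfold IsBorder
  rw [h1, h2, concat_suffix_concat, List.getD_eq_getElem w ' ' ht, List.getD_eq_getElem w ' ' hkl]
  constructor
  · rintro ⟨_, hs, he⟩; exact ⟨⟨hk, hs⟩, he.symm⟩
  · rintro ⟨⟨_, hs⟩, he⟩; exact ⟨by omega, hs, he.symm⟩

lemma border_iff_take_eq {w : List Char} {k t : Nat} (hk : k < t) (ht : t ≤ w.length) :
    IsBorder w k t ↔ w.take k = (w.drop (t - k)).take k := by
  have hlt : (w.take t).length = t := by simp; omega
  have hlk : (w.take k).length = k := by simp; omega
  have hdt : (w.take t).drop ((w.take t).length - (w.take k).length)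
      = (w.drop (t - k)).take k := by
    rw [hlt, hlk, List.drop_take]
    congr 1
    omega
  unfold IsBorder
  rw [List.suffix_iff_eq_drop, hdt]
  constructor
  · rintro ⟨_, h⟩; exact h
  · intro h; exact ⟨hk, h⟩

lemma border_zero {w : List Char} {i : Nat} (h : 0 < i) : IsBorder w 0 i :=
  ⟨h, by simp⟩

-- chase is fuel-insensitive once fuel ≥ k, given correct entries below t
lemma chase_fuel {w : List Char} {tbl : List Int} {c : Char} {t : Nat}
    (htbl : ∀ u, u < t → tbl.getD u 0 = (pf w u : Int)) :
    ∀ f k, k ≤ t → k ≤ f → kmpChase w tbl c f k = kmpChase w tbl c k k := by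
  intro f k
  induction k using Nat.strong_induction_on generalizing f with
  | _ k ih =>
    intro hkt hkf
    match k, f with
    | 0, 0 => rfl
    | 0, f+1 => rfl
    | k+1, f =>
      obtain ⟨f', rfl⟩ : ∃ f', f = f' + 1 := ⟨f - 1, by omega⟩
      by_cases hc : w.getD (k+1) ' ' = c
      · simp only [kmpChase, hc, if_pos]
      · simp only [kmpChase, hc, ite_false]
        have hval : (tbl.getD k 0).toNat = pf w k := by
          rw [htbl k (by omega)]; simp
        have hle : (tbl.getD k 0).toNat ≤ k := by rw [hval]; exact pf_le w k
        rw [ih (tbl.getD k 0).toNat (by omega) f' (by omega) (by omega),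
          ← ih (tbl.getD k 0).toNat (by omega) k (by omega) (by omega)]

-- full specification of the chase (the 'while' loop) on a correct partial table
lemma chase_spec {w : List Char} {tbl : List Int} {c : Char} {t : Nat}
    (htbl : ∀ u, u < t → tbl.getD u 0 = (pf w u : Int)) :
    ∀ k, k ≤ t → (k = 0 ∨ IsBorder w k t) →
      (kmpChase w tbl c k k ≤ k)
      ∧ (kmpChase w tbl c k k = 0 ∨
          (IsBorder w (kmpChase w tbl c k k) t ∧ w.getD (kmpChase w tbl c k k) ' ' = c))
      ∧ (∀ k', 0 < k' → k' ≤ k → IsBorder w k' t → w.getD k' ' ' = c → k' ≤ kmpChase w tbl c k k) := by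
  intro k
  induction k using Nat.strong_induction_on with
  | _ k ih =>
    intro hkt hkb
    match k with
    | 0 =>
      refine ⟨le_refl _, Or.inl rfl, ?_⟩
      intro k' hk'0 hk' _ _; omega
    | k+1 =>
      have hb : IsBorder w (k+1) t := hkb.resolve_left (by omega)
      by_cases hc : w.getD (k+1) ' ' = c
      · have hv : kmpChase w tbl c (k+1) (k+1) = k+1 := by simp only [kmpChase, hc, if_pos]
        rw [hv]
        exact ⟨le_refl _, Or.inr ⟨hb, hc⟩, fun k' _ hk' _ _ => hk'⟩
      · have hkt' : k < t := by omega
        have hval : (tbl.getD k 0).toNat = pf w k := by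
          rw [htbl k hkt']; simp
        have hle : (tbl.getD k 0).toNat ≤ k := by rw [hval]; exact pf_le w k
        have hred : kmpChase w tbl c (k+1) (k+1) = kmpChase w tbl c (tbl.getD k 0).toNat (tbl.getD k 0).toNat := by
          simp only [kmpChase, hc, ite_false]
          exact chase_fuel htbl k (tbl.getD k 0).toNat (by omega) hle
        have hb1 : (tbl.getD k 0).toNat = 0 ∨ IsBorder w (tbl.getD k 0).toNat t := by
          rcases pf_is_border (w := w) k with h | ⟨hpos, hbd⟩
          · exact Or.inl (by omega)
          · exact Or.inr (border_trans (hval ▸ hbd) hb)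
        obtain ⟨ih1, ih2, ih3⟩ := ih (tbl.getD k 0).toNat (by omega) (by omega) hb1
        rw [hred]
        refine ⟨by omega, ih2, ?_⟩
        intro k' hk'0 hk'le hk'b hk'c
        have hk'ne : k' ≠ k + 1 := fun h => hc (h ▸ hk'c)
        have hk'b1 : IsBorder w k' (k+1) := border_of_borders hk'b hb (by omega)
        have hk'le1 : k' ≤ pf w k := by
          have := border_le_pf hk'b1 (by omega)
          simpa using this
        exact ih3 k' hk'0 (by omega) hk'b hk'c

-- one step of the prefix recurrence computes pf i from pf (i-1)
lemma pf_succ {w : List Char} {tbl : List Int} {i : Nat} (h0i : 0 < i) (hi : i < w.length)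
    (htbl : ∀ u, u < i → tbl.getD u 0 = (pf w u : Int)) :
    (if w.getD i ' ' = w.getD (kmpChase w tbl (w.getD i ' ') (pf w (i-1)) (pf w (i-1))) ' '
     then kmpChase w tbl (w.getD i ' ') (pf w (i-1)) (pf w (i-1)) + 1
     else kmpChase w tbl (w.getD i ' ') (pf w (i-1)) (pf w (i-1))) = pf w i := by
  set c := w.getD i ' ' with hc
  set k0 := pf w (i-1) with hk0
  have hk0le : k0 ≤ i - 1 := pf_le w (i-1)
  have hk0b : k0 = 0 ∨ IsBorder w k0 i := by
    rcases pf_is_border (w := w) (i-1) with h | ⟨_, hbd⟩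
    · exact Or.inl h
    · right; have : i - 1 + 1 = i := by omega
      rwa [this] at hbd
  obtain ⟨hr1, hr2, hr3⟩ := chase_spec htbl k0 (by omega) hk0b
  set r := kmpChase w tbl c k0 k0 with hr
  have hri : r < i := by omega
  by_cases hcr : c = w.getD r ' '
  · rw [if_pos hcr]
    have hrb : IsBorder w r i := by
      rcases hr2 with h0 | ⟨hb, _⟩
      · rw [h0]; exact border_zero h0i
      · exact hb
    have hb1 : IsBorder w (r+1) (i+1) := by
      rw [border_succ_iff hri hi]; exact ⟨hrb, hcr⟩
    have hle1 : r + 1 ≤ pf w i := by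
      have := border_le_pf hb1 (by omega)
      simpa using this
    have hle2 : pf w i ≤ r + 1 := by
      rcases pf_is_border (w := w) i with h | ⟨hp, hbd⟩
      · omega
      · set p := pf w i with hp'
        have hpi : p ≤ i := pf_le w i
        obtain ⟨q, hq⟩ : ∃ q, p = q + 1 := ⟨p - 1, by omega⟩
        rw [hq] at hbd
        have hqi : q < i := by omega
        rw [border_succ_iff hqi hi] at hbd
        obtain ⟨hqb, hqc⟩ := hbd
        rcases Nat.eq_zero_or_pos q with h0 | hqpos
        · omega
        · have hq0 : q ≤ pf w (i-1) := by
            have := border_le_pf hqb (by omega)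
            simpa using this
          have := hr3 q hqpos (by omega) hqb hqc.symm
          omega
    omega
  · rw [if_neg hcr]
    have hr0 : r = 0 := by
      rcases hr2 with h0 | ⟨_, hbc⟩
      · exact h0
      · exact absurd hbc.symm hcr
    have : pf w i = 0 := by
      unfold pf
      rw [Nat.findGreatest_eq_zero_iff]
      intro n hn0 hni hP
      obtain ⟨hposn, hnb⟩ := hP
      obtain ⟨q, hq⟩ : ∃ q, n = q + 1 := ⟨n - 1, by omega⟩
      rw [hq] at hnb
      have hqi : q < i := by omega
      rw [border_succ_iff hqi hi] at hnb
      obtain ⟨hqb, hqc⟩ := hnb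
      rcases Nat.eq_zero_or_pos q with hq0 | hqpos
      · rw [hq0] at hqc
        exact hcr (by rw [hr0]; exact hqc)
      · have := hr3 q hqpos (by
          have := border_le_pf hqb (by omega)
          simp at this; omega) hqb hqc.symm
        omega
    omega

-- B's prefix-function fold invariant
lemma kmpPrefix_inv (w : List Char) : ∀ t, 1 ≤ t → t ≤ w.length →
    ((List.range' 1 (t - 1)).foldl (kmpPrefixStep w) (List.replicate w.length 0, 0)).2 = pf w (t-1)
    ∧ ((List.range' 1 (t - 1)).foldl (kmpPrefixStep w) (List.replicate w.length 0, 0)).1.length = w.length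
    ∧ ∀ u, u < w.length →
        ((List.range' 1 (t - 1)).foldl (kmpPrefixStep w) (List.replicate w.length 0, 0)).1.getD u 0
          = if u < t then (pf w u : Int) else 0 := by
  intro t
  induction t with
  | zero => intro h1 _; exact absurd h1 (by omega)
  | succ t ih =>
    intro h1 h2
    rcases Nat.eq_zero_or_pos t with ht0 | htpos
    · subst ht0
      refine ⟨rfl, by simp, ?_⟩
      intro u hu
      rcases Nat.eq_zero_or_pos u with h | h
      · subst h; simp [pf_zero]
      · simp [List.getD_eq_getElem?_getD, hu, show ¬ u < 1 by omega]
    · obtain ⟨ihk, ihlen, ihget⟩ := ih (by omega) (by omega)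
      have ht1 : t + 1 - 1 = (t - 1) + 1 := by omega
      have hrange : List.range' 1 (t + 1 - 1) = List.range' 1 (t - 1) ++ [t] := by
        rw [ht1, List.range'_concat]
        congr 1
        simp; omega
      rw [hrange, List.foldl_append, List.foldl_cons, List.foldl_nil]
      set st := (List.range' 1 (t - 1)).foldl (kmpPrefixStep w) (List.replicate w.length 0, 0) with hst
      have htlen : t < w.length := by omega
      have htbl : ∀ u, u < t → st.1.getD u 0 = (pf w u : Int) := by
        intro u hu
        rw [ihget u (by omega), if_pos hu]
      have hk2 : kmpPrefixK w st t = pf w t := by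
        unfold kmpPrefixK
        rw [ihk]
        exact pf_succ (w := w) (tbl := st.1) (i := t) htpos htlen htbl
      have hstep : kmpPrefixStep w st t = (st.1.set t ((pf w t : Nat) : Int), pf w t) := by
        unfold kmpPrefixStep
        rw [hk2]
      rw [hstep]
      refine ⟨rfl, by simp [ihlen], ?_⟩
      intro u hu
      by_cases hut : u = t
      · subst hut
        have hlt : u < st.1.length := by omega
        rw [List.getD_eq_getElem?_getD]
        simp [hlt]
      · rw [List.getD_eq_getElem?_getD]
        simp only [List.getElem?_set, if_neg (fun h : t = u => hut h.symm)]
        rw [← List.getD_eq_getElem?_getD, ihget u hu]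
        have hiff : u < t + 1 ↔ u < t := by omega
        simp [hiff]

lemma kmpPrefix_getD (w : List Char) (hw : w ≠ []) :
    ∀ u, u < w.length → (kmpPrefix w).getD u 0 = (pf w u : Int) := by
  intro u hu
  have hlen : 1 ≤ w.length := by
    cases w with
    | nil => exact absurd rfl hw
    | cons a l => simp
  obtain ⟨_, _, hget⟩ := kmpPrefix_inv w w.length hlen (le_refl _)
  unfold kmpPrefix
  rw [hget u hu, if_pos hu]

-- the slice comparison in A's table loop tests exactly the border property
lemma sliceCond_iff (w : List Char) (t j : Nat) (hj : j < t) (ht : t < w.length) :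
    (PySem.List.slice w (some 0) (some ((j:Int) + 1))
      = PySem.List.slice w (some ((t:Int) - (j:Int))) (some ((t:Int) + 1)))
    ↔ IsBorder w (j+1) (t+1) := by
  have h1 : ((j:Int)+1) = ((j+1 : Nat) : Int) := by push_cast; ring
  have h2 : ((t:Int) - (j:Int)) = ((t - j : Nat) : Int) := by omega
  have h3 : ((t:Int)+1) = ((t+1 : Nat) : Int) := by push_cast; ring
  rw [PySem.List.slice_zero_start, h1, h3, h2, PySem.List.slice_to_natCast,
    PySem.List.slice_natCast]
  have h4 : (t+1) - (t-j) = j+1 := by omega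
  rw [h4, border_iff_take_eq (by omega) (by omega)]
  have h5 : (t+1) - (j+1) = t - j := by omega
  rw [h5]

-- A's inner loop writes, last-write-wins, the greatest border length found so far
lemma outerStep (w : List Char) (t : Nat) (h0 : 0 < t) (htm : t < w.length)
    (tbl : List Int) (hlen : tbl.length = w.length) (h00 : tbl.getD t 0 = 0) :
    ((PySem.List.pyRange 0 ((t:Int)) 1).foldl (fun table j =>
        if PySem.List.slice w (some 0) (some (j + 1)) =
           PySem.List.slice w (some ((t:Int) - j)) (some ((t:Int) + 1))
        then PySem.List.pySetD table (t:Int) (j + 1) else table) tbl).length = w.length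
    ∧ ∀ u, u < w.length →
      ((PySem.List.pyRange 0 ((t:Int)) 1).foldl (fun table j =>
        if PySem.List.slice w (some 0) (some (j + 1)) =
           PySem.List.slice w (some ((t:Int) - j)) (some ((t:Int) + 1))
        then PySem.List.pySetD table (t:Int) (j + 1) else table) tbl).getD u 0
        = if u = t then (pf w t : Int) else tbl.getD u 0 := by
  rw [PySem.List.pyRange_one, List.foldl_map]
  have hzt : ((t:Int) - 0).toNat = t := by omega
  rw [hzt]
  simp only [zero_add]
  suffices h : ∀ v, v ≤ t →
      ((List.range v).foldl (fun x (y : Nat) =>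
          if PySem.List.slice w (some 0) (some ((y:Int) + 1)) =
             PySem.List.slice w (some ((t:Int) - (y:Int))) (some ((t:Int) + 1))
          then PySem.List.pySetD x (t:Int) ((y:Int) + 1) else x) tbl).length = w.length
      ∧ ∀ u, u < w.length →
        ((List.range v).foldl (fun x (y : Nat) =>
          if PySem.List.slice w (some 0) (some ((y:Int) + 1)) =
             PySem.List.slice w (some ((t:Int) - (y:Int))) (some ((t:Int) + 1))
          then PySem.List.pySetD x (t:Int) ((y:Int) + 1) else x) tbl).getD u 0
          = if u = t then ((Nat.findGreatest (fun k => 0 < k ∧ IsBorder w k (t+1)) v : Nat) : Int)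
            else tbl.getD u 0 by
    obtain ⟨hl, hg⟩ := h t (le_refl t)
    exact ⟨hl, hg⟩
  intro v
  induction v with
  | zero =>
    intro _
    refine ⟨by simpa using hlen, ?_⟩
    intro u hu
    by_cases hut : u = t
    · subst hut
      simp only [Nat.findGreatest_zero]
      simpa using h00
    · simp [List.foldl_nil, hut]
  | succ v ihv =>
    intro hvt
    obtain ⟨ihl, ihg⟩ := ihv (by omega)
    rw [List.range_succ, List.foldl_append, List.foldl_cons, List.foldl_nil]
    have hcond := sliceCond_iff w t v (by omega) htm
    have hcast : (v:Int) + 1 = ((v+1 : Nat) : Int) := by push_cast; ring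
    by_cases hb : IsBorder w (v+1) (t+1)
    · rw [if_pos (hcond.mpr hb), hcast, PySem.List.pySetD_natCast]
      refine ⟨by simpa using ihl, ?_⟩
      intro u hu
      have hFG : Nat.findGreatest (fun k => 0 < k ∧ IsBorder w k (t+1)) (v+1) = v+1 := by
        rw [Nat.findGreatest_succ, if_pos ⟨by omega, hb⟩]
      by_cases hut : u = t
      · subst hut
        rw [List.getD_eq_getElem?_getD, List.getElem?_set, if_pos rfl, ihl, if_pos hu, hFG, if_pos rfl]
        rfl
      · rw [List.getD_eq_getElem?_getD]
        simp only [List.getElem?_set, if_neg (fun h : t = u => hut h.symm)]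
        rw [← List.getD_eq_getElem?_getD, ihg u hu, if_neg hut, if_neg hut]
    · rw [if_neg (fun hc => hb (hcond.mp hc))]
      have hFG : Nat.findGreatest (fun k => 0 < k ∧ IsBorder w k (t+1)) (v+1)
          = Nat.findGreatest (fun k => 0 < k ∧ IsBorder w k (t+1)) v := by
        rw [Nat.findGreatest_succ, if_neg (fun h => hb h.2)]
      rw [hFG] at *
      exact ⟨ihl, ihg⟩

lemma kmpTableA_getD (w : List Char) :
    ∀ u, u < w.length → (kmpTableA w).getD u 0 = (pf w u : Int) := by
  unfold kmpTableA
  rw [PySem.List.pyRange_one, List.foldl_map]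
  have hm : ((w.length : Int) - 1).toNat = w.length - 1 := by omega
  rw [hm]
  suffices h : ∀ n, n ≤ w.length - 1 →
      ((List.range n).foldl (fun x (y : Nat) =>
          (PySem.List.pyRange 0 (1 + (y:Int)) 1).foldl (fun table j =>
            if PySem.List.slice w (some 0) (some (j + 1)) =
               PySem.List.slice w (some (1 + (y:Int) - j)) (some (1 + (y:Int) + 1))
            then PySem.List.pySetD table (1 + (y:Int)) (j + 1) else table) x)
          (List.replicate w.length 0)).length = w.length
      ∧ ∀ u, u < w.length →
        ((List.range n).foldl (fun x (y : Nat) =>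
          (PySem.List.pyRange 0 (1 + (y:Int)) 1).foldl (fun table j =>
            if PySem.List.slice w (some 0) (some (j + 1)) =
               PySem.List.slice w (some (1 + (y:Int) - j)) (some (1 + (y:Int) + 1))
            then PySem.List.pySetD table (1 + (y:Int)) (j + 1) else table) x)
          (List.replicate w.length 0)).getD u 0
          = if u ≤ n then (pf w u : Int) else 0 by
    intro u hu
    obtain ⟨_, hg⟩ := h (w.length - 1) (le_refl _)
    rw [hg u hu, if_pos (by omega)]
  intro n
  induction n with
  | zero =>
    intro _
    refine ⟨by simp, ?_⟩
    intro u hu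
    by_cases hu0 : u = 0
    · subst hu0
      simp [pf_zero]
    · simp [List.getD_eq_getElem?_getD, hu, show ¬ u ≤ 0 by omega]
  | succ n ihn =>
    intro hn1
    obtain ⟨ihl, ihg⟩ := ihn (by omega)
    rw [List.range_succ, List.foldl_append, List.foldl_cons, List.foldl_nil]
    have hcast : (1 : Int) + (n : Int) = ((n + 1 : Nat) : Int) := by push_cast; ring
    simp only [hcast]
    have h00 := ihg (n+1) (by omega)
    rw [if_neg (by omega)] at h00
    obtain ⟨hl, hg⟩ := outerStep w (n+1) (by omega) (by omega) _ ihl h00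
    refine ⟨hl, ?_⟩
    intro u hu
    rw [hg u hu]
    by_cases hut : u = n+1
    · subst hut
      rw [if_pos rfl, if_pos (by omega)]
    · rw [if_neg hut, ihg u hu]
      by_cases hun : u ≤ n
      · rw [if_pos hun, if_pos (by omega)]
      · rw [if_neg hun, if_neg (by omega)]

-- the chase from j stays at j when the char at j matches (or j = 0)
lemma chase_stay {w : List Char} {tbl : List Int} {c : Char} {j : Nat}
    (h : j = 0 ∨ w.getD j ' ' = c) : kmpChase w tbl c j j = j := by
  rcases h with h0 | hc
  · subst h0; rfl
  · match j, hc with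
    | 0, _ => rfl
    | jp+1, hc => simp only [kmpChase, hc, if_pos]

-- the chase from j > 0 on a mismatch steps to the chase from pf w (j-1)
lemma chase_step {w : List Char} {tbl : List Int} {c : Char} {jp : Nat}
    (htbl : ∀ u, u < w.length → tbl.getD u 0 = (pf w u : Int))
    (hj : jp + 1 ≤ w.length) (hc : ¬ w.getD (jp+1) ' ' = c) :
    kmpChase w tbl c (jp+1) (jp+1) = kmpChase w tbl c (pf w jp) (pf w jp) := by
  have hval : (tbl.getD jp 0).toNat = pf w jp := by
    rw [htbl jp (by omega)]; simp
  have hle : pf w jp ≤ jp := pf_le w jp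
  have htbl' : ∀ u, u < w.length → tbl.getD u 0 = (pf w u : Int) := htbl
  simp only [kmpChase, hc, ite_false]
  rw [hval]
  exact chase_fuel (t := w.length) htbl jp (pf w jp) (by omega) (by omega)

-- main simulation: A's while loop equals the fold of A's effective per-character step
lemma loop_sim (s w : List Char) (hw : w ≠ []) :
    ∀ fuel i j count, 2 * (s.length - i) + j + 1 ≤ fuel → j < w.length →
      kmpLoopA s w (kmpTableA w) fuel i j count
        = ((s.drop i).foldl (kmpScanStep w (kmpPrefix w) w.length) (j, count)).2 := by
  have hm : 0 < w.length := List.length_pos_iff.mpr hw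
  have htA := kmpTableA_getD w
  have htB := kmpPrefix_getD w hw
  intro fuel
  induction fuel with
  | zero => intro i j count hfuel _; omega
  | succ fuel ih =>
    intro i j count hfuel hj
    by_cases hi : i < s.length
    · have hdrop : s.drop i = s[i] :: s.drop (i+1) := List.drop_eq_getElem_cons hi
      have hwj : PySem.List.pyGet? w ((j : Nat) : Int) = some w[j] := by
        rw [PySem.List.pyGet?_natCast, List.getElem?_eq_getElem hj]
      have hsi : PySem.List.pyGet? s ((i : Nat) : Int) = some s[i] := by
        rw [PySem.List.pyGet?_natCast, List.getElem?_eq_getElem hi]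
      have hgj : w.getD j ' ' = w[j] := List.getD_eq_getElem w ' ' hj
      simp only [kmpLoopA, if_pos hi, hwj, hsi]
      rw [hdrop, List.foldl_cons]
      by_cases hc : w[j] = s[i]
      · rw [if_pos (by rw [hc])]
        have hchase : kmpChase w (kmpPrefix w) s[i] j j = j :=
          chase_stay (Or.inr (by rw [hgj, hc]))
        have hJ : kmpScanJ w (kmpPrefix w) j s[i] = j + 1 := by
          unfold kmpScanJ
          rw [hchase, if_pos (by rw [hgj, hc])]
        by_cases hjm : j + 1 = w.length
        · by_cases h1 : w.length = 1
          · rw [if_pos hjm, if_pos h1]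
            have hj0 : j = 0 := by omega
            subst hj0
            have hstep : kmpScanStep w (kmpPrefix w) w.length (0, count) s[i] = (0, count + 1) := by
              unfold kmpScanStep
              rw [if_pos (by rw [hJ, hjm])]
              simp [h1]
            rw [hstep]
            exact ih (i+1) 0 (count+1) (by omega) hm
          · rw [if_pos hjm, if_neg h1]
            have hL : kmpScanStep w (kmpPrefix w) w.length (j, count) s[i]
                = (if 1 < w.length ∧ w.getD 0 ' ' = s[i] then 1 else 0, count + 1) := by
              unfold kmpScanStep
              rw [if_pos (by rw [hJ]; exact hjm)]
            have hJ0 : kmpScanJ w (kmpPrefix w) 0 s[i]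
                = if w.getD 0 ' ' = s[i] then 1 else 0 := by
              unfold kmpScanJ
              rw [show kmpChase w (kmpPrefix w) s[i] 0 0 = 0 from rfl]
            have hR : kmpScanStep w (kmpPrefix w) w.length (0, count + 1) s[i]
                = (if w.getD 0 ' ' = s[i] then 1 else 0, count + 1) := by
              unfold kmpScanStep
              rw [hJ0, if_neg (by
                by_cases hd0 : w.getD 0 ' ' = s[i]
                · rw [if_pos hd0]; omega
                · rw [if_neg hd0]; omega)]
            have hsteps : kmpScanStep w (kmpPrefix w) w.length (j, count) s[i]
                = kmpScanStep w (kmpPrefix w) w.length (0, count + 1) s[i] := by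
              rw [hL, hR]
              by_cases hd0 : w.getD 0 ' ' = s[i]
              · rw [if_pos ⟨by omega, hd0⟩, if_pos hd0]
              · rw [if_neg (fun h => hd0 h.2), if_neg hd0]
            rw [hsteps, ← List.foldl_cons, ← hdrop]
            exact ih i 0 (count+1) (by omega) hm
        · rw [if_neg hjm]
          have hstep : kmpScanStep w (kmpPrefix w) w.length (j, count) s[i] = (j + 1, count) := by
            unfold kmpScanStep
            rw [if_neg (by rw [hJ]; exact hjm), hJ]
          rw [hstep]
          exact ih (i+1) (j+1) count (by omega) (by omega)
      · rw [if_neg (by simpa using hc)]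
        by_cases hj0 : j = 0
        · rw [if_pos hj0]
          subst hj0
          have hstep : kmpScanStep w (kmpPrefix w) w.length (0, count) s[i] = (0, count) := by
            unfold kmpScanStep
            have hJ0 : kmpScanJ w (kmpPrefix w) 0 s[i] = 0 := by
              unfold kmpScanJ
              rw [show kmpChase w (kmpPrefix w) s[i] 0 0 = 0 from rfl,
                if_neg (by rw [hgj]; exact hc)]
            rw [if_neg (by rw [hJ0]; omega), hJ0]
          rw [hstep]
          exact ih (i+1) 0 count (by omega) hm
        · rw [if_neg hj0]
          obtain ⟨jp, rfl⟩ : ∃ jp, j = jp + 1 := ⟨j - 1, by omega⟩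
          have hcast : ((jp + 1 : Nat) : Int) - 1 = ((jp : Nat) : Int) := by push_cast; ring
          have hA : (PySem.List.pyGetD (kmpTableA w) (((jp + 1 : Nat) : Int) - 1) 0).toNat
              = pf w jp := by
            rw [hcast, PySem.List.pyGetD_natCast, htA jp (by omega)]
            simp
          rw [hA]
          have hchase : kmpChase w (kmpPrefix w) s[i] (jp+1) (jp+1)
              = kmpChase w (kmpPrefix w) s[i] (pf w jp) (pf w jp) :=
            chase_step htB (by omega) (by rw [hgj]; exact hc)
          have hsteps : kmpScanStep w (kmpPrefix w) w.length (jp+1, count) s[i]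
              = kmpScanStep w (kmpPrefix w) w.length (pf w jp, count) s[i] := by
            unfold kmpScanStep kmpScanJ
            rw [hchase]
          rw [hsteps, ← List.foldl_cons, ← hdrop]
          have hple : pf w jp ≤ jp := pf_le w jp
          exact ih i (pf w jp) count (by omega) (by omega)
    · simp only [kmpLoopA, if_neg hi]
      rw [List.drop_eq_nil_of_le (by omega), List.foldl_nil]

-- ===== windowed-automaton machinery: both scan folds count occurrence ends =====

lemma findGreatest_pos_spec (P : Nat → Prop) [DecidablePred P] (b : Nat)
    (h : 0 < Nat.findGreatest P b) : P (Nat.findGreatest P b) := by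
  have h0 : Nat.findGreatest P b ≠ 0 := by omega
  have hex : ¬ (∀ n, 0 < n → n ≤ b → ¬ P n) := fun hall => h0 (Nat.findGreatest_eq_zero_iff.mpr hall)
  push Not at hex
  obtain ⟨n, hn0, hnb, hP⟩ := hex
  exact Nat.findGreatest_spec hnb hP

lemma suf_ext {w s : List Char} {k t : Nat} (hk : k < w.length) (ht : t < s.length)
    (h : w.take k <:+ s.take t) (hc : w.getD k ' ' = s[t]) : w.take (k+1) <:+ s.take (t+1) := by
  rw [List.take_succ_eq_append_getElem hk, List.take_succ_eq_append_getElem ht,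
    concat_suffix_concat]
  exact ⟨h, by rw [← List.getD_eq_getElem w ' ' hk, hc]⟩

lemma suf_split {w s : List Char} {k t : Nat} (hk : k < w.length) (ht : t < s.length)
    (h : w.take (k+1) <:+ s.take (t+1)) : w.take k <:+ s.take t ∧ w.getD k ' ' = s[t] := by
  rw [List.take_succ_eq_append_getElem hk, List.take_succ_eq_append_getElem ht,
    concat_suffix_concat] at h
  exact ⟨h.1, by rw [List.getD_eq_getElem w ' ' hk, h.2]⟩

lemma border_of_sufs {w s : List Char} {k j t : Nat} (hkj : k < j) (hj : j ≤ w.length)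
    (hk' : w.take k <:+ s.take t) (hj' : w.take j <:+ s.take t) : IsBorder w k j := by
  refine ⟨hkj, List.suffix_of_suffix_length_le hk' hj' ?_⟩
  simp only [List.length_take]
  omega

lemma suf_of_border_state {w s : List Char} {r j t : Nat} (hj : w.take j <:+ s.take t)
    (h : r = j ∨ IsBorder w r j) : w.take r <:+ s.take t := by
  rcases h with rfl | hb
  · exact hj
  · exact hb.2.trans hj

-- specification of the chase as used while scanning the text (state j, incoming char c)
lemma scan_chase_spec {w : List Char} {tbl : List Int} {c : Char}
    (htbl : ∀ u, u < w.length → tbl.getD u 0 = (pf w u : Int)) (j : Nat) (hj : j < w.length) :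
    kmpChase w tbl c j j ≤ j
    ∧ (kmpChase w tbl c j j = 0 ∨
        ((kmpChase w tbl c j j = j ∨ IsBorder w (kmpChase w tbl c j j) j)
          ∧ w.getD (kmpChase w tbl c j j) ' ' = c))
    ∧ (∀ k, k ≤ j → (k = j ∨ IsBorder w k j) → w.getD k ' ' = c → k ≤ kmpChase w tbl c j j) := by
  by_cases hc : w.getD j ' ' = c
  · rw [chase_stay (Or.inr hc)]
    exact ⟨le_refl _, Or.inr ⟨Or.inl rfl, hc⟩, fun k hk _ _ => hk⟩
  · match j, hj, hc with
    | 0, hj, hc =>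
      refine ⟨le_refl _, Or.inl rfl, ?_⟩
      intro k hk _ _; omega
    | jp+1, hj, hc =>
      have hstep := chase_step (jp := jp) htbl (by omega) hc
      have hple : pf w jp ≤ jp := pf_le w jp
      have htbl' : ∀ u, u < jp+1 → tbl.getD u 0 = (pf w u : Int) := fun u hu => htbl u (by omega)
      have hkb : pf w jp = 0 ∨ IsBorder w (pf w jp) (jp+1) := by
        rcases pf_is_border (w := w) jp with h | h
        · exact Or.inl h
        · exact Or.inr h.2
      obtain ⟨h1, h2, h3⟩ := chase_spec (t := jp+1) htbl' (pf w jp) (by omega) hkb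
      rw [hstep]
      refine ⟨le_trans h1 (by omega), ?_, ?_⟩
      · rcases h2 with h | h
        · exact Or.inl h
        · exact Or.inr ⟨Or.inr h.1, h.2⟩
      · intro k hk hkcase hkc
        rcases hkcase with rfl | hkb2
        · exact absurd hkc hc
        · rcases Nat.eq_zero_or_pos k with rfl | hk0
          · omega
          · refine h3 k hk0 ?_ hkb2 hkc
            have := border_le_pf hkb2 (by omega)
            simpa using this

-- one scan step from a windowed-maximal state yields the windowed-maximal state one char later
lemma scan_step_spec {w s : List Char} {tbl : List Int}
    (htbl : ∀ u, u < w.length → tbl.getD u 0 = (pf w u : Int))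
    (W t j : Nat) (ht : t < s.length) (hjm : j + 1 ≤ w.length)
    (hjsuf : w.take j <:+ s.take t) (hjW : W + j ≤ t)
    (hjmax : ∀ k, k + 1 ≤ w.length → w.take k <:+ s.take t → W + k ≤ t → k ≤ j) :
    kmpScanJ w tbl j s[t] ≤ w.length
    ∧ w.take (kmpScanJ w tbl j s[t]) <:+ s.take (t+1)
    ∧ W + kmpScanJ w tbl j s[t] ≤ t + 1
    ∧ (∀ k, k ≤ w.length → w.take k <:+ s.take (t+1) → W + k ≤ t + 1 → k ≤ kmpScanJ w tbl j s[t]) := by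
  obtain ⟨h1, h2, h3⟩ := scan_chase_spec (c := s[t]) htbl j (by omega)
  set r0 := kmpChase w tbl s[t] j j with hr0
  have hr0suf : w.take r0 <:+ s.take t := by
    rcases h2 with h | h
    · rw [h]; simp
    · exact suf_of_border_state hjsuf h.1
  unfold kmpScanJ
  rw [← hr0]
  by_cases hcm : w.getD r0 ' ' = s[t]
  · rw [if_pos hcm]
    refine ⟨by omega, suf_ext (by omega) ht hr0suf hcm, by omega, ?_⟩
    intro k hk hksuf hkW
    match k with
    | 0 => omega
    | kp+1 =>
      obtain ⟨hkpsuf, hkpc⟩ := suf_split (by omega) ht hksuf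
      have hkpj : kp ≤ j := hjmax kp (by omega) hkpsuf (by omega)
      rcases Nat.lt_or_ge kp j with hlt | hge
      · have hb : IsBorder w kp j := border_of_sufs hlt (by omega) hkpsuf hjsuf
        have := h3 kp (by omega) (Or.inr hb) hkpc
        omega
      · have hkeq : kp = j := by omega
        have := h3 j (le_refl _) (Or.inl rfl) (by rw [← hkeq]; exact hkpc)
        omega
  · rw [if_neg hcm]
    have hr00 : r0 = 0 := by
      rcases h2 with h | h
      · exact h
      · exact absurd h.2 hcm
    rw [hr00]
    refine ⟨by omega, by simp, by omega, ?_⟩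
    intro k hk hksuf hkW
    match k with
    | 0 => omega
    | kp+1 =>
      exfalso
      obtain ⟨hkpsuf, hkpc⟩ := suf_split (by omega) ht hksuf
      have hkpj : kp ≤ j := hjmax kp (by omega) hkpsuf (by omega)
      rcases Nat.lt_or_ge kp j with hlt | hge
      · have hb : IsBorder w kp j := border_of_sufs hlt (by omega) hkpsuf hjsuf
        have hle0 : kp ≤ r0 := h3 kp (by omega) (Or.inr hb) hkpc
        have hkp0 : kp = 0 := by omega
        rw [hkp0] at hkpc
        exact hcm (by rw [hr00]; exact hkpc)
      · have hkeq : kp = j := by omega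
        have hler : j ≤ r0 := h3 j (le_refl _) (Or.inl rfl) (by rw [← hkeq]; exact hkpc)
        have hj0 : j = 0 := by omega
        rw [hkeq, hj0] at hkpc
        exact hcm (by rw [hr00]; exact hkpc)

-- position just after the last occurrence of w ending within the first t characters (0 if none)
def lastEnd (w s : List Char) (t : Nat) : Nat :=
  Nat.findGreatest (fun p => w <:+ s.take p) t

lemma lastEnd_le (w s : List Char) (t : Nat) : lastEnd w s t ≤ t := Nat.findGreatest_le t

lemma lastEnd_succ (w s : List Char) (t : Nat) :
    lastEnd w s (t+1) = if w <:+ s.take (t+1) then t+1 else lastEnd w s t := by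
  unfold lastEnd
  exact Nat.findGreatest_succ _

lemma occEnd_iff {w s : List Char} {p : Nat} (hp : p ≤ s.length) :
    (w <:+ s.take p) ↔ (w.length ≤ p ∧ (s.drop (p - w.length)).take w.length = w) := by
  constructor
  · intro h
    have hlen : w.length ≤ p := by
      have := h.length_le
      simp only [List.length_take] at this
      omega
    refine ⟨hlen, ?_⟩
    obtain ⟨u, hu⟩ := h
    have hlen2 : (s.take p).length = p := by simp; omega
    have hw : (s.take p).drop (p - w.length) = w := by
      rw [← hu]
      have hul : u.length = p - w.length := by
        have : u.length + w.length = p := by rw [← hlen2, ← hu]; simp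
        omega
      rw [← hul, List.drop_left]
    conv_rhs => rw [← hw]
    rw [List.drop_take]
    congr 1
    omega
  · rintro ⟨hlen, hw⟩
    rw [List.suffix_iff_eq_drop]
    have hlen2 : (s.take p).length = p := by simp; omega
    rw [hlen2, List.drop_take]
    have heq : p - (p - w.length) = w.length := by omega
    rw [heq]
    exact hw.symm

-- two occurrences overlapping by at least two characters exhibit the D_ witness shape
lemma two_occ_D {s w : List Char} {p q : Nat} (hpq : p < q) (hq1 : q + 1 < p + w.length)
    (hpo : (s.drop p).take w.length = w)
    (hqo : (s.drop q).take w.length = w) :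
    ∃ d, d < w.length ∧ 1 ≤ d ∧ d + 2 ≤ w.length ∧
      w.drop d = w.take (w.length - d) ∧ (w.take d ++ w) <:+: s := by
  refine ⟨q - p, by omega, by omega, by omega, ?_, ?_⟩
  · have e1 : w.drop (q - p) = ((s.drop p).take w.length).drop (q - p) := by rw [hpo]
    have e2 : ((s.drop p).take w.length).drop (q - p)
        = ((s.drop p).drop (q - p)).take (w.length - (q - p)) := by rw [List.drop_take]
    have e3 : (s.drop p).drop (q - p) = s.drop (p + (q - p)) := by rw [List.drop_drop]
    have e4 : p + (q - p) = q := by omega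
    have e5 : w.take (w.length - (q - p))
        = ((s.drop q).take w.length).take (w.length - (q - p)) := by rw [hqo]
    rw [e1, e2, e3, e4, e5, List.take_take]
    congr 1
    omega
  · have e6 : w.take (q - p) ++ w = (s.drop p).take ((q - p) + w.length) := by
      rw [List.take_add]
      congr 1
      · have e7 : w.take (q - p) = ((s.drop p).take w.length).take (q - p) := by rw [hpo]
        rw [e7, List.take_take]
        congr 1
        omega
      · have e8 : (s.drop p).drop (q - p) = s.drop (p + (q - p)) := by rw [List.drop_drop]
        have e4 : p + (q - p) = q := by omega
        rw [e8, e4]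
        exact hqo.symm
    rw [e6]
    exact ((s.drop p).take_prefix _).isInfix.trans (s.drop_suffix p).isInfix

-- outside D_, the window of A's restart never excludes the next occurrence
lemma window_ok {s w : List Char} (hw : w ≠ [])
    (hD : ¬ (∃ d, d < w.length ∧ 1 ≤ d ∧ d + 2 ≤ w.length ∧
        w.drop d = w.take (w.length - d) ∧ (w.take d ++ w) <:+: s))
    {t : Nat} (ht : t < s.length) (hocc : w <:+ s.take (t+1)) :
    (lastEnd w s t - 1) + w.length ≤ t + 1 := by
  have hm : 0 < w.length := List.length_pos_iff.mpr hw
  have hmt : w.length ≤ t + 1 := by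
    have := hocc.length_le
    simp only [List.length_take] at this
    omega
  rcases Nat.eq_zero_or_pos (lastEnd w s t) with h0 | hpos
  · rw [h0]; omega
  · set p := lastEnd w s t with hp
    have hPp : w <:+ s.take p := findGreatest_pos_spec _ _ hpos
    have hpt : p ≤ t := lastEnd_le w s t
    by_cases hclose : p - 1 + w.length ≤ t + 1
    · exact hclose
    · exfalso
      apply hD
      have hmp : w.length ≤ p := by
        have := hPp.length_le
        simp only [List.length_take] at this
        omega
      have h1 := (occEnd_iff (by omega : p ≤ s.length)).mp hPp
      have h2 := (occEnd_iff (by omega : t + 1 ≤ s.length)).mp hocc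
      exact two_occ_D (p := p - w.length) (q := t + 1 - w.length)
        (by omega) (by omega) h1.2 h2.2

-- the scan-state invariant: j is the longest prefix of w that is a suffix of s.take t
-- among those starting at or after position W
def ScanInv (w s : List Char) (W t j : Nat) : Prop :=
  j + 1 ≤ w.length ∧ w.take j <:+ s.take t ∧ W + j ≤ t
  ∧ ∀ k, k + 1 ≤ w.length → w.take k <:+ s.take t → W + k ≤ t → k ≤ j

lemma inv_start {w s : List Char} (hw : w ≠ []) : ScanInv w s 0 0 0 := by
  have hm : 0 < w.length := List.length_pos_iff.mpr hw
  refine ⟨by omega, by simp, by omega, ?_⟩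
  intro k hk hksuf _
  have h1 : w.take k <:+ ([] : List Char) := by simpa using hksuf
  have h2 : w.take k = [] := List.suffix_nil.mp h1
  rcases List.take_eq_nil_iff.mp h2 with h | h
  · omega
  · exact absurd h hw

lemma inv_after_match_b {w s : List Char} {t : Nat} (hw : w ≠ [])
    (hocc : w <:+ s.take (t+1)) : ScanInv w s 0 (t+1) (pf w (w.length - 1)) := by
  have hm : 0 < w.length := List.length_pos_iff.mpr hw
  have hple : pf w (w.length - 1) ≤ w.length - 1 := pf_le w _
  have hmt : w.length ≤ t + 1 := by
    have := hocc.length_le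
    simp only [List.length_take] at this
    omega
  refine ⟨by omega, ?_, by omega, ?_⟩
  · rcases pf_is_border (w := w) (w.length - 1) with h0 | ⟨_, hb⟩
    · rw [h0]; simp
    · have hb' : w.take (pf w (w.length - 1)) <:+ w.take ((w.length - 1) + 1) := hb.2
      have heq : (w.length - 1) + 1 = w.length := by omega
      rw [heq, List.take_length] at hb'
      exact hb'.trans hocc
  · intro k hk hksuf hkW
    rcases Nat.eq_zero_or_pos k with rfl | hk0
    · omega
    · have hkw : w.take k <:+ w :=
        List.suffix_of_suffix_length_le hksuf hocc (by simp only [List.length_take]; omega)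
      have hb : IsBorder w k w.length := ⟨by omega, by rw [List.take_length]; exact hkw⟩
      have := border_le_pf hb (by omega)
      exact this

lemma inv_after_match_h {w s : List Char} {t : Nat} (hw : w ≠ []) (ht : t < s.length) :
    ScanInv w s t (t+1) (if 1 < w.length ∧ w.getD 0 ' ' = s[t] then 1 else 0) := by
  have hm : 0 < w.length := List.length_pos_iff.mpr hw
  by_cases hcond : 1 < w.length ∧ w.getD 0 ' ' = s[t]
  · rw [if_pos hcond]
    refine ⟨by omega, ?_, by omega, ?_⟩
    · exact suf_ext (by omega) ht (by simp) hcond.2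
    · intro k hk hksuf hkW
      omega
  · rw [if_neg hcond]
    refine ⟨by omega, by simp, by omega, ?_⟩
    intro k hk hksuf hkW
    rcases k with _ | k
    · omega
    rcases k with _ | k
    · exfalso
      obtain ⟨_, hc⟩ := suf_split (k := 0) (by omega) ht hksuf
      exact hcond ⟨by omega, hc⟩
    · omega

-- the two scan folds stay in lockstep: equal counts, each state windowed-maximal
lemma fold_inv (s w : List Char) (tbl : List Int) (hw : w ≠ [])
    (htbl : ∀ u, u < w.length → tbl.getD u 0 = (pf w u : Int))
    (hD : ¬ (∃ d, d < w.length ∧ 1 ≤ d ∧ d + 2 ≤ w.length ∧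
        w.drop d = w.take (w.length - d) ∧ (w.take d ++ w) <:+: s)) :
    ∀ t, t ≤ s.length →
      ((s.take t).foldl (kmpScanStep w tbl w.length) (0, 0)).2
          = ((s.take t).foldl (kmpScanStep2 w tbl w.length) (0, 0)).2
      ∧ ScanInv w s (lastEnd w s t - 1) t ((s.take t).foldl (kmpScanStep w tbl w.length) (0, 0)).1
      ∧ ScanInv w s 0 t ((s.take t).foldl (kmpScanStep2 w tbl w.length) (0, 0)).1 := by
  have hm : 0 < w.length := List.length_pos_iff.mpr hw
  intro t
  induction t with
  | zero =>
    intro _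
    have h00 : lastEnd w s 0 = 0 := Nat.findGreatest_zero
    simp only [List.take_zero, List.foldl_nil]
    rw [h00]
    exact ⟨by simp, inv_start hw, inv_start hw⟩
  | succ t ih =>
    intro ht1
    obtain ⟨ihc, ihh, ihb⟩ := ih (by omega)
    have hts : t < s.length := by omega
    have htake : s.take (t+1) = s.take t ++ [s[t]] := List.take_succ_eq_append_getElem hts
    rw [htake]
    simp only [List.foldl_append, List.foldl_cons, List.foldl_nil]
    set sh := (s.take t).foldl (kmpScanStep w tbl w.length) (0, 0) with hsh
    set sb := (s.take t).foldl (kmpScanStep2 w tbl w.length) (0, 0) with hsb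
    obtain ⟨hh1, hh2, hh3, hh4⟩ := ihh
    obtain ⟨hb1, hb2, hb3, hb4⟩ := ihb
    obtain ⟨Ah1, Ah2, Ah3, Ah4⟩ := scan_step_spec htbl (lastEnd w s t - 1) t sh.1 hts hh1 hh2 hh3 hh4
    obtain ⟨Ab1, Ab2, Ab3, Ab4⟩ := scan_step_spec htbl 0 t sb.1 hts hb1 hb2 hb3 hb4
    by_cases hocc : w <:+ s.take (t+1)
    · have hwin : (lastEnd w s t - 1) + w.length ≤ t + 1 := window_ok hw hD hts hocc
      have hwsuf : w.take w.length <:+ s.take (t+1) := by rw [List.take_length]; exact hocc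
      have hmt1 : w.length ≤ t + 1 := by
        have := hocc.length_le
        simp only [List.length_take] at this
        omega
      have hrhm : kmpScanJ w tbl sh.1 s[t] = w.length :=
        le_antisymm Ah1 (Ah4 w.length (le_refl _) hwsuf hwin)
      have hrbm : kmpScanJ w tbl sb.1 s[t] = w.length :=
        le_antisymm Ab1 (Ab4 w.length (le_refl _) hwsuf (by omega))
      have hle : lastEnd w s (t+1) = t+1 := by rw [lastEnd_succ, if_pos hocc]
      have hgh : kmpScanStep w tbl w.length sh s[t]
          = (if 1 < w.length ∧ w.getD 0 ' ' = s[t] then 1 else 0, sh.2 + 1) := by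
        unfold kmpScanStep
        rw [if_pos hrhm]
      have hgb : kmpScanStep2 w tbl w.length sb s[t]
          = ((tbl.getD (w.length - 1) 0).toNat, sb.2 + 1) := by
        unfold kmpScanStep2
        rw [if_pos hrbm, hrbm]
      rw [hgh, hgb]
      have hpfv : (tbl.getD (w.length - 1) 0).toNat = pf w (w.length - 1) := by
        rw [htbl (w.length - 1) (by omega)]; simp
      refine ⟨by simp [ihc], ?_, ?_⟩
      · rw [hle]
        exact inv_after_match_h hw hts
      · rw [hpfv]
        exact inv_after_match_b hw hocc
    · have hrhne : kmpScanJ w tbl sh.1 s[t] ≠ w.length := by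
        intro h
        apply hocc
        have := Ah2
        rw [h, List.take_length] at this
        exact this
      have hrbne : kmpScanJ w tbl sb.1 s[t] ≠ w.length := by
        intro h
        apply hocc
        have := Ab2
        rw [h, List.take_length] at this
        exact this
      have hle : lastEnd w s (t+1) = lastEnd w s t := by rw [lastEnd_succ, if_neg hocc]
      have hgh : kmpScanStep w tbl w.length sh s[t] = (kmpScanJ w tbl sh.1 s[t], sh.2) := by
        unfold kmpScanStep
        rw [if_neg hrhne]
      have hgb : kmpScanStep2 w tbl w.length sb s[t] = (kmpScanJ w tbl sb.1 s[t], sb.2) := by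
        unfold kmpScanStep2
        rw [if_neg hrbne]
      rw [hgh, hgb]
      refine ⟨by simpa using ihc, ?_, ?_⟩
      · rw [hle]
        exact ⟨by omega, Ah2, Ah3, fun k hk a b => Ah4 k (by omega) a b⟩
      · exact ⟨by omega, Ab2, Ab3, fun k hk a b => Ab4 k (by omega) a b⟩

-- ===== counting machinery for the tightness theorem =====

-- the set of positions p ≤ t at which an occurrence of w ends (w is a suffix of s.take p)
def EndsUpTo (w s : List Char) (t : Nat) : Finset Nat :=
  (Finset.range (t+1)).filter (fun p => w <:+ s.take p)

lemma mem_EndsUpTo {w s : List Char} {t p : Nat} :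
    p ∈ EndsUpTo w s t ↔ p ≤ t ∧ w <:+ s.take p := by
  simp [EndsUpTo, Finset.mem_filter, Finset.mem_range]

lemma EndsUpTo_mono {w s : List Char} {t : Nat} :
    EndsUpTo w s t ⊆ EndsUpTo w s (t+1) := by
  intro p hp
  rw [mem_EndsUpTo] at hp ⊢
  exact ⟨by omega, hp.2⟩

lemma EndsUpTo_succ_occ {w s : List Char} {t : Nat} (h : w <:+ s.take (t+1)) :
    EndsUpTo w s (t+1) = insert (t+1) (EndsUpTo w s t) := by
  ext p
  simp only [mem_EndsUpTo, Finset.mem_insert]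
  constructor
  · rintro ⟨hp, hocc⟩
    by_cases hpt : p = t+1
    · exact Or.inl hpt
    · exact Or.inr ⟨by omega, hocc⟩
  · rintro (rfl | ⟨hp, hocc⟩)
    · exact ⟨le_refl _, h⟩
    · exact ⟨by omega, hocc⟩

lemma EndsUpTo_succ_nocc {w s : List Char} {t : Nat} (h : ¬ w <:+ s.take (t+1)) :
    EndsUpTo w s (t+1) = EndsUpTo w s t := by
  ext p
  simp only [mem_EndsUpTo]
  constructor
  · rintro ⟨hp, hocc⟩
    refine ⟨?_, hocc⟩
    by_cases hpt : p = t+1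
    · subst hpt; exact absurd hocc h
    · omega
  · rintro ⟨hp, hocc⟩
    exact ⟨by omega, hocc⟩

lemma EndsUpTo_zero {w s : List Char} (hw : w ≠ []) : EndsUpTo w s 0 = ∅ := by
  ext p
  simp only [mem_EndsUpTo, Finset.notMem_empty, iff_false]
  rintro ⟨hp, hocc⟩
  have hp0 : p = 0 := by omega
  subst hp0
  have h1 : w <:+ ([] : List Char) := by simpa using hocc
  exact hw (List.suffix_nil.mp h1)

lemma mem_EndsUpTo_pos {w s : List Char} {t p : Nat} (hw : w ≠ []) (h : p ∈ EndsUpTo w s t) :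
    w.length ≤ p := by
  rw [mem_EndsUpTo] at h
  have := h.2.length_le
  simp only [List.length_take] at this
  have hm : 0 < w.length := List.length_pos_iff.mpr hw
  omega

-- B's fold counts every occurrence end (no side condition)
lemma B_count (s w : List Char) (tbl : List Int) (hw : w ≠ [])
    (htbl : ∀ u, u < w.length → tbl.getD u 0 = (pf w u : Int)) :
    ∀ t, t ≤ s.length →
      ScanInv w s 0 t ((s.take t).foldl (kmpScanStep2 w tbl w.length) (0, 0)).1
      ∧ ((s.take t).foldl (kmpScanStep2 w tbl w.length) (0, 0)).2
          = ((EndsUpTo w s t).card : Int) := by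
  have hm : 0 < w.length := List.length_pos_iff.mpr hw
  intro t
  induction t with
  | zero =>
    intro _
    simp only [List.take_zero, List.foldl_nil]
    rw [EndsUpTo_zero hw]
    exact ⟨inv_start hw, by simp⟩
  | succ t ih =>
    intro ht1
    obtain ⟨ihb, ihc⟩ := ih (by omega)
    have hts : t < s.length := by omega
    have htake : s.take (t+1) = s.take t ++ [s[t]] := List.take_succ_eq_append_getElem hts
    rw [htake]
    simp only [List.foldl_append, List.foldl_cons, List.foldl_nil]
    set sb := (s.take t).foldl (kmpScanStep2 w tbl w.length) (0, 0) with hsb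
    obtain ⟨hb1, hb2, hb3, hb4⟩ := ihb
    obtain ⟨Ab1, Ab2, Ab3, Ab4⟩ := scan_step_spec htbl 0 t sb.1 hts hb1 hb2 hb3 hb4
    by_cases hr : kmpScanJ w tbl sb.1 s[t] = w.length
    · have hocc : w <:+ s.take (t+1) := by
        have := Ab2
        rw [hr, List.take_length] at this
        exact this
      have hgb : kmpScanStep2 w tbl w.length sb s[t]
          = ((tbl.getD (w.length - 1) 0).toNat, sb.2 + 1) := by
        unfold kmpScanStep2
        rw [if_pos hr, hr]
      rw [hgb]
      have hpfv : (tbl.getD (w.length - 1) 0).toNat = pf w (w.length - 1) := by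
        rw [htbl (w.length - 1) (by omega)]; simp
      have hnotmem : t + 1 ∉ EndsUpTo w s t := by
        intro hmem
        rw [mem_EndsUpTo] at hmem
        omega
      refine ⟨by rw [hpfv]; exact inv_after_match_b hw hocc, ?_⟩
      rw [EndsUpTo_succ_occ hocc, Finset.card_insert_of_notMem hnotmem]
      push_cast
      omega
    · have hocc : ¬ w <:+ s.take (t+1) := by
        intro hocc
        apply hr
        refine le_antisymm Ab1 (Ab4 w.length (le_refl _) ?_ ?_)
        · rw [List.take_length]; exact hocc
        · have := hocc.length_le
          simp only [List.length_take] at this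
          omega
      have hgb : kmpScanStep2 w tbl w.length sb s[t] = (kmpScanJ w tbl sb.1 s[t], sb.2) := by
        unfold kmpScanStep2
        rw [if_neg hr]
      rw [hgb, EndsUpTo_succ_nocc hocc]
      exact ⟨⟨by omega, Ab2, Ab3, fun k hk a b => Ab4 k (by omega) a b⟩, ihc⟩

-- A's fold counts a set of occurrence ends that are pairwise at least len(word)-1 apart
lemma A_count (s w : List Char) (tbl : List Int) (hw : w ≠ [])
    (htbl : ∀ u, u < w.length → tbl.getD u 0 = (pf w u : Int)) :
    ∀ t, t ≤ s.length → ∃ (e : Nat) (S : Finset Nat),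
      ((e = 0 ∧ S = ∅) ∨ (e ∈ S ∧ ∀ a ∈ S, a ≤ e))
      ∧ e ≤ t
      ∧ S ⊆ EndsUpTo w s t
      ∧ (∀ a ∈ S, ∀ b ∈ S, a < b → a + (w.length - 1) ≤ b)
      ∧ ScanInv w s (e - 1) t ((s.take t).foldl (kmpScanStep w tbl w.length) (0, 0)).1
      ∧ ((s.take t).foldl (kmpScanStep w tbl w.length) (0, 0)).2 = (S.card : Int) := by
  have hm : 0 < w.length := List.length_pos_iff.mpr hw
  intro t
  induction t with
  | zero =>
    intro _
    refine ⟨0, ∅, Or.inl ⟨rfl, rfl⟩, le_refl _, by simp, by simp, ?_, by simp⟩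
    simp only [List.take_zero, List.foldl_nil]
    exact inv_start hw
  | succ t ih =>
    intro ht1
    obtain ⟨e, S, hdisj, he, hsub, hgap, ihh, ihc⟩ := ih (by omega)
    have hts : t < s.length := by omega
    have htake : s.take (t+1) = s.take t ++ [s[t]] := List.take_succ_eq_append_getElem hts
    rw [htake]
    simp only [List.foldl_append, List.foldl_cons, List.foldl_nil]
    set sh := (s.take t).foldl (kmpScanStep w tbl w.length) (0, 0) with hsh
    obtain ⟨hh1, hh2, hh3, hh4⟩ := ihh
    obtain ⟨Ah1, Ah2, Ah3, Ah4⟩ := scan_step_spec htbl (e - 1) t sh.1 hts hh1 hh2 hh3 hh4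
    by_cases hr : kmpScanJ w tbl sh.1 s[t] = w.length
    · have hocc : w <:+ s.take (t+1) := by
        have := Ah2
        rw [hr, List.take_length] at this
        exact this
      have hwin : (e - 1) + w.length ≤ t + 1 := by
        have := Ah3
        rw [hr] at this
        exact this
      have hgh : kmpScanStep w tbl w.length sh s[t]
          = (if 1 < w.length ∧ w.getD 0 ' ' = s[t] then 1 else 0, sh.2 + 1) := by
        unfold kmpScanStep
        rw [if_pos hr]
      rw [hgh]
      have hSle : ∀ a ∈ S, a ≤ t := by
        intro a ha
        have := hsub ha
        rw [mem_EndsUpTo] at this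
        omega
      have hnotmem : t + 1 ∉ S := fun hmem => by have := hSle _ hmem; omega
      refine ⟨t+1, insert (t+1) S, ?_, le_refl _, ?_, ?_, ?_, ?_⟩
      · refine Or.inr ⟨Finset.mem_insert_self _ _, ?_⟩
        intro a ha
        rcases Finset.mem_insert.mp ha with rfl | ha
        · exact le_refl _
        · have := hSle _ ha; omega
      · refine Finset.insert_subset ?_ (hsub.trans EndsUpTo_mono)
        rw [mem_EndsUpTo]
        exact ⟨le_refl _, hocc⟩
      · intro a ha b hb hab
        rcases Finset.mem_insert.mp ha with rfl | ha
        · rcases Finset.mem_insert.mp hb with rfl | hb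
          · omega
          · have := hSle _ hb; omega
        · rcases Finset.mem_insert.mp hb with rfl | hb
          · -- a ∈ S, b = t+1 : use a ≤ e and the detection window
            rcases hdisj with ⟨he0, hS0⟩ | ⟨heS, hmax⟩
            · rw [hS0] at ha
              exact absurd ha (Finset.notMem_empty a)
            · have hae : a ≤ e := hmax a ha
              have hee : w.length ≤ e := mem_EndsUpTo_pos hw (hsub heS)
              omega
          · exact hgap a ha b hb hab
      · exact inv_after_match_h hw hts
      · rw [Finset.card_insert_of_notMem hnotmem]
        push_cast
        omega
    · have hgh : kmpScanStep w tbl w.length sh s[t] = (kmpScanJ w tbl sh.1 s[t], sh.2) := by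
        unfold kmpScanStep
        rw [if_neg hr]
      rw [hgh]
      exact ⟨e, S, hdisj, by omega, hsub.trans EndsUpTo_mono, hgap,
        ⟨by omega, Ah2, Ah3, fun k hk a b => Ah4 k (by omega) a b⟩, ihc⟩

-- ===== VERDICT (by name: the statements are the Claim_ definitions above) =====
theorem kmp_finder_spec : Claim_unchanged_kmp_finder := by
  intro string word _ hpre
  unfold Spec_kmp_finder
  intro hD
  by_cases hw : word = ""
  · subst hw
    have hs : string = "" := by
      rcases hpre with h | h
      · exact absurd rfl h
      · exact h
    subst hs
    rfl
  · have hwl : word.toList ≠ [] := fun h => hw (String.toList_eq_nil_iff.mp h)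
    have hm : 0 < word.toList.length := List.length_pos_iff.mpr hwl
    have htbl := kmpPrefix_getD word.toList hwl
    have hDl := hD
    unfold D_kmp_finder at hDl
    obtain ⟨hc, _, _⟩ := fold_inv string.toList word.toList (kmpPrefix word.toList) hwl htbl
      hDl string.toList.length (le_refl _)
    simp only [List.take_length] at hc
    simp only [kmp_finder, kmp_finder_alt]
    rw [loop_sim string.toList word.toList hwl (2 * string.toList.length + 1) 0 0 0
      (by omega) hm, List.drop_zero]
    exact hc

theorem kmp_finder_changed : Claim_changed_kmp_finder := by
  unfold Claim_changed_kmp_finder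
  decide

theorem kmp_finder_tight : Claim_exact_kmp_finder := by
  intro string word hdom hpre hD
  unfold D_kmp_finder at hD
  obtain ⟨d, hdm, hd1, hd2, hper, hinf⟩ := hD
  have hwl : word.toList ≠ [] := by
    intro h
    rw [h] at hd2
    simp at hd2
  have hm : 0 < word.toList.length := List.length_pos_iff.mpr hwl
  have htbl := kmpPrefix_getD word.toList hwl
  obtain ⟨_, hbcount⟩ := B_count string.toList word.toList (kmpPrefix word.toList) hwl htbl
    string.toList.length (le_refl _)
  obtain ⟨e, S, hdisj, he, hsub, hgap, _, hacount⟩ := A_count string.toList word.toList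
    (kmpPrefix word.toList) hwl htbl string.toList.length (le_refl _)
  simp only [List.take_length] at hbcount hacount
  have hA : kmp_finder string word = (S.card : Int) := by
    simp only [kmp_finder]
    rw [loop_sim string.toList word.toList hwl (2 * string.toList.length + 1) 0 0 0
      (by omega) hm, List.drop_zero]
    exact hacount
  have hB : kmp_finder_alt string word
      = (((EndsUpTo word.toList string.toList string.toList.length).card : Nat) : Int) := by
    simp only [kmp_finder_alt]
    exact hbcount
  -- extract the two overlapping occurrences from the D_ witness
  obtain ⟨u, v, huv⟩ := hinf
  have hdlen : (word.toList.take d).length = d := by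
    simp only [List.length_take]
    omega
  have hnlen : u.length + (d + word.toList.length) + v.length = string.toList.length := by
    rw [← huv]
    simp only [List.length_append, hdlen]
  have h1 : u ++ ((word.toList.take d ++ word.toList) ++ v) = string.toList := by
    rw [← huv]
    simp [List.append_assoc]
  have hdrop1 : string.toList.drop u.length = (word.toList.take d ++ word.toList) ++ v := by
    rw [← h1, List.drop_left]
  have h2 : (u ++ word.toList.take d) ++ (word.toList ++ v) = string.toList := by
    rw [← huv]
    simp [List.append_assoc]
  have hlen2 : (u ++ word.toList.take d).length = u.length + d := by
    simp [hdlen]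
  have hdrop2 : string.toList.drop (u.length + d) = word.toList ++ v := by
    rw [← h2, ← hlen2, List.drop_left]
  have hocc2 : (string.toList.drop (u.length + d)).take word.toList.length = word.toList := by
    rw [hdrop2, List.take_left]
  have hocc1 : (string.toList.drop u.length).take word.toList.length = word.toList := by
    rw [hdrop1, List.take_append_of_le_length (by simp [hdlen]),
      List.take_append]
    have ht1 : (word.toList.take d).take word.toList.length = word.toList.take d := by
      rw [List.take_take]
      congr 1
      omega
    rw [ht1, hdlen, ← hper, List.take_append_drop]
  -- the two occurrence ends, d < len(word) - 1 apart
  have hE1 : (u.length + word.toList.length)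
      ∈ EndsUpTo word.toList string.toList string.toList.length := by
    rw [mem_EndsUpTo]
    refine ⟨by omega, ?_⟩
    rw [occEnd_iff (by omega)]
    refine ⟨by omega, ?_⟩
    have heq : u.length + word.toList.length - word.toList.length = u.length := by omega
    rw [heq]
    exact hocc1
  have hE2 : (u.length + d + word.toList.length)
      ∈ EndsUpTo word.toList string.toList string.toList.length := by
    rw [mem_EndsUpTo]
    refine ⟨by omega, ?_⟩
    rw [occEnd_iff (by omega)]
    refine ⟨by omega, ?_⟩
    have heq : u.length + d + word.toList.length - word.toList.length = u.length + d := by omega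
    rw [heq]
    exact hocc2
  -- both cannot be in S, so S is a strict subset
  have hnotboth : ¬ ((u.length + word.toList.length) ∈ S
      ∧ (u.length + d + word.toList.length) ∈ S) := by
    rintro ⟨hin1, hin2⟩
    have := hgap _ hin1 _ hin2 (by omega)
    omega
  have hss : S ⊂ EndsUpTo word.toList string.toList string.toList.length := by
    rw [Finset.ssubset_iff_of_subset hsub]
    by_cases hin1 : (u.length + word.toList.length) ∈ S
    · exact ⟨u.length + d + word.toList.length, hE2, fun hin2 => hnotboth ⟨hin1, hin2⟩⟩
    · exact ⟨u.length + word.toList.length, hE1, hin1⟩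
  have hcard := Finset.card_lt_card hss
  rw [hA, hB]
  intro heq
  have : S.card = (EndsUpTo word.toList string.toList string.toList.length).card :=
    Nat.cast_injective heq
  omega
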